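-- pv_equiv track=rewrite | github.com/nyawanga/price_tracker | utils/pyspark_helpers.py | date_file_splitter
-- ===== SOURCE A (Python) =====
-- def date_file_splitter(path_list: list) -> dict:
--     date_path_dict = {}
--     for path in path_list:
--         date_value = str(path).split("/")[-1].split("-")[0]
--         if date_path_dict.get(date_value):
--             date_path_dict[date_value].append(path)
--         else:
--             date_path_dict[date_value] = [path]
--
--     return date_path_dict
-- ===== SOURCE B (Python) =====
-- def date_file_splitter(path_list: list) -> dict:
--     def key(p):
--         return str(p).split("/")[-1].split("-")[0]
--     keys = dict.fromkeys(key(p) for p in path_list)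
--     return {k: [p for p in path_list if key(p) == k] for k in keys}
-- ===== Notes on version B (the rewrite author's own statement) =====
-- stated objective: alternative
-- what changed: Replaces the single-pass hash-bucket append loop with a two-pass grouping: dedup the date keys in first-occurrence order, then build each group by filtering the whole list per key.
import Mathlib
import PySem

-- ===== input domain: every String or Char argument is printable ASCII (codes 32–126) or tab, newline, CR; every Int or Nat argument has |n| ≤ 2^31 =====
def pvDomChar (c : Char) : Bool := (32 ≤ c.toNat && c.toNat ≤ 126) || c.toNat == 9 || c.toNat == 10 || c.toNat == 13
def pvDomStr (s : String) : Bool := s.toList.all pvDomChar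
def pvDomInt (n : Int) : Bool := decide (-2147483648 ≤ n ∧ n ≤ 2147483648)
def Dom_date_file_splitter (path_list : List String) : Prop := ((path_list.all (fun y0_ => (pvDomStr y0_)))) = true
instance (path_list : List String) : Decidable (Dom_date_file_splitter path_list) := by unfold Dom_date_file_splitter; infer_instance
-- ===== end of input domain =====

-- B groups in two passes (dedup the date keys, then filter the list per key) instead of A's single-pass bucket-append loop; alternative decomposition, same results.


-- str(path).split("/")[-1].split("-")[0]; str.split with a separator always returns a
-- nonempty list, so [-1] is the last element and [0] the head (the defaults are unreachable).
def pvKey (path : String) : String :=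
  -- split? returns none only for sep = "", and a nonempty list otherwise: the .getD/.getLastD/.headD defaults are unreachable
  ((PySem.Str.split? (((PySem.Str.split? path "/").getD [""]).getLastD "") "-").getD [""]).headD ""

-- ===== PORT A =====
def date_file_splitter (path_list : List String) : List (String × List String) :=
  (path_list.foldl (fun d path =>
      let date_value := pvKey path
      match d.get? date_value with
      | some l =>
          -- 'if date_path_dict.get(date_value):' — truthy iff present AND nonempty
          if l.isEmpty then d.insert date_value [path]
          else d.modify date_value [] (fun v => v ++ [path])
      | none => d.insert date_value [path])
    (PySem.Dict.empty : PySem.Dict String (List String))).items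

-- ===== PORT B =====
def date_file_splitter_alt (path_list : List String) : List (String × List String) :=
  (PySem.List.dedup (path_list.map pvKey)).map
    (fun k => (k, path_list.filter (fun p => pvKey p == k)))

-- ===== PRECONDITION & SPEC =====
def Spec_date_file_splitter (path_list : List String) (out : List (String × List String)) : Prop := out = date_file_splitter_alt path_list
instance (path_list : List String) (out : List (String × List String)) : Decidable (Spec_date_file_splitter path_list out) := by unfold Spec_date_file_splitter; infer_instance

-- ===== CLAIM (what is proved, stated in full; the proofs are below) =====
def Claim_equal_date_file_splitter : Prop := ∀ (path_list : List String), Dom_date_file_splitter path_list → Spec_date_file_splitter path_list (date_file_splitter path_list)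

-- ===== LEMMAS AND PROOFS =====

-- A's loop body, named for the proofs
def pvStepA (d : PySem.Dict String (List String)) (path : String) : PySem.Dict String (List String) :=
  match d.get? (pvKey path) with
  | some l =>
      if l.isEmpty then d.insert (pvKey path) [path]
      else d.modify (pvKey path) [] (fun v => v ++ [path])
  | none => d.insert (pvKey path) [path]

def pvStepM (d : PySem.Dict String (List String)) (path : String) : PySem.Dict String (List String) :=
  d.modify (pvKey path) [] (fun v => v ++ [path])

-- invariant: every stored value is a nonempty list
def pvGood (d : PySem.Dict String (List String)) : Prop :=
  ∀ k l, d.get? k = some l → l ≠ []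

theorem pvStepA_eq (d : PySem.Dict String (List String)) (path : String) (h : pvGood d) :
    pvStepA d path = pvStepM d path := by
  unfold pvStepA pvStepM
  cases hg : d.get? (pvKey path) with
  | none =>
      simp only [PySem.Dict.modify, PySem.Dict.getD_eq_get?_getD, hg, Option.getD_none,
        List.nil_append]

  | some l =>
      have hne : l ≠ [] := h _ _ hg
      simp [List.isEmpty_iff, hne]

theorem pvGood_stepM (d : PySem.Dict String (List String)) (path : String) (h : pvGood d) :
    pvGood (pvStepM d path) := by
  intro k l hl
  unfold pvStepM at hl
  rw [PySem.Dict.modify, PySem.Dict.get?_insert] at hl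
  split at hl
  · cases hl; simp
  · exact h _ _ hl

theorem pvFold_eq (xs : List String) (d : PySem.Dict String (List String)) (h : pvGood d) :
    xs.foldl pvStepA d = xs.foldl pvStepM d := by
  induction xs generalizing d with
  | nil => rfl
  | cons x xs ih =>
      simp only [List.foldl_cons, pvStepA_eq d x h]
      exact ih _ (pvGood_stepM d x h)

-- ===== VERDICT (by name: the statement is the Claim_ definition above) =====
theorem pvGood_empty : pvGood (PySem.Dict.empty : PySem.Dict String (List String)) := by
  intro k l hl
  simp [PySem.Dict.get?_empty] at hl

theorem pvFoldM_getD (xs : List String) (c : String) :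
    ((xs.foldl pvStepM (PySem.Dict.empty : PySem.Dict String (List String))).getD c []) =
      xs.filter (fun p => pvKey p == c) := by
  have h : xs.foldl pvStepM (PySem.Dict.empty : PySem.Dict String (List String)) =
      (xs.map (fun p => (pvKey p, p))).foldl
        (fun d q => d.modify q.1 [] (fun v => v ++ [q.2])) PySem.Dict.empty := by
    rw [List.foldl_map]
    rfl
  rw [h, PySem.Dict.getD_foldl_modify_append]
  simp [List.filter_map, Function.comp_def]

theorem pvFoldM_keys (xs : List String) :
    ((xs.foldl pvStepM (PySem.Dict.empty : PySem.Dict String (List String))).keys) =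
      PySem.Set.ofList (xs.map pvKey) := by
  have h := PySem.Dict.keys_foldl_modify_key xs pvKey ([] : List String)
    (fun _ path => fun v => v ++ [path]) (PySem.Dict.empty : PySem.Dict String (List String))
  simpa [pvStepM, PySem.Set.update_nil_left, PySem.Dict.keys_empty] using h

theorem pvFoldM_nodup (xs : List String) :
    ((xs.foldl pvStepM (PySem.Dict.empty : PySem.Dict String (List String))).keys).Nodup := by
  have h := PySem.Dict.nodup_keys_foldl_modify_key xs pvKey ([] : List String)
    (fun _ path => fun v => v ++ [path]) (PySem.Dict.empty : PySem.Dict String (List String))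
    (by simp [PySem.Dict.keys_empty])
  simpa [pvStepM] using h

-- ===== VERDICT (by name: the statement is the Claim_ definition above) =====
theorem date_file_splitter_spec : Claim_equal_date_file_splitter := by
  intro xs _
  show date_file_splitter xs = date_file_splitter_alt xs
  have hA : date_file_splitter xs = (xs.foldl pvStepA PySem.Dict.empty).items := rfl
  rw [hA, pvFold_eq xs _ pvGood_empty,
    PySem.Dict.items_eq_map_keys _ (pvFoldM_nodup xs) ([] : List String), pvFoldM_keys]
  unfold date_file_splitter_alt
  rw [PySem.List.dedup_eq_ofList]
  exact List.map_congr_left (fun k _ => by rw [pvFoldM_getD])
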